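-- pv_equiv track=rewrite | github.com/KJSubodh/3Frames-Assignment- | version.py | apply_delta
-- ===== SOURCE A (Python) =====
-- def apply_delta(version, delta):
--     version = list(version)
--     index = 0
--     for change in delta:
--         if change.startswith('-'):
--             if index < len(version):
--                 version.pop(index)
--         elif change.startswith('+'):
--             if len(change) > 2:
--                 version.insert(index, change[2])
--                 index += 1
--         elif change.startswith(' '):
--             index += 1
--     return ''.join(version)
-- ===== SOURCE B (Python) =====
-- def apply_delta(version, delta):
--     out = []
--     i = 0
--     n = len(version)
--     for change in delta:
--         if change.startswith('-'):
--             if i < n: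
--                 i += 1
--         elif change.startswith('+'):
--             if len(change) > 2:
--                 out.append(change[2])
--         elif change.startswith(' '):
--             if i < n:
--                 out.append(version[i])
--                 i += 1
--     return ''.join(out) + version[i:]
-- ===== Notes on version B (the rewrite author's own statement) =====
-- stated objective: alternative
-- what changed: B replaces A's in-place pop/insert editing of a mutable char list with a single forward pass keeping a cursor into the original string and appending to an output list, concatenating the untouched tail at the end.
import Mathlib
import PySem

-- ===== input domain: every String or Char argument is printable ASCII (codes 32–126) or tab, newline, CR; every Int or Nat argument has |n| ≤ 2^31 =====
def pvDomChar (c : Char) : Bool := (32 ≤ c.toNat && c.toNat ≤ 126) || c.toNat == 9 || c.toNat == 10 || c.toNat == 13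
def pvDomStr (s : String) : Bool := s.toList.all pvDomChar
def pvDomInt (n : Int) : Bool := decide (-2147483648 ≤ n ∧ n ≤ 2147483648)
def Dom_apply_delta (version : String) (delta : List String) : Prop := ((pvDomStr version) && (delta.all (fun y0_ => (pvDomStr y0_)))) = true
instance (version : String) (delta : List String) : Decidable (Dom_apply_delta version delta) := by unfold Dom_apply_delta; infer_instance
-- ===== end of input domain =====

-- B applies the delta in one forward pass over the original string (cursor + output list)
-- instead of A's repeated pop/insert editing of a mutable list: same return value.

-- ===== PORT A =====
-- state: (version as a char list, index), exactly A's loop body per delta entry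
def applyDeltaStepA (st : List Char × Nat) (change : String) : List Char × Nat :=
  if PySem.Str.startswith change "-" then
    if st.2 < st.1.length then
      match PySem.List.pop? st.1 (st.2 : Int) with
      | some (_, v') => (v', st.2)
      | none => st
    else st
  else if PySem.Str.startswith change "+" then
    if 2 < PySem.Str.len change then
      match PySem.Str.pyGet? change 2 with
      | some c => (PySem.List.insert st.1 (st.2 : Int) c, st.2 + 1)
      | none => st
    else st
  else if PySem.Str.startswith change " " then
    (st.1, st.2 + 1)
  else st

def apply_delta (version : String) (delta : List String) : String :=
  let st := delta.foldl applyDeltaStepA (version.toList, 0)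
  String.ofList st.1

-- ===== PORT B =====
-- state: (output so far, cursor i into the original); orig is the original char list, n its length
def applyDeltaStepB (orig : List Char) (n : Nat) (st : List Char × Nat) (change : String) : List Char × Nat :=
  if PySem.Str.startswith change "-" then
    if st.2 < n then (st.1, st.2 + 1) else st
  else if PySem.Str.startswith change "+" then
    if 2 < PySem.Str.len change then
      match PySem.Str.pyGet? change 2 with
      | some c => (st.1 ++ [c], st.2)
      | none => st
    else st
  else if PySem.Str.startswith change " " then
    if st.2 < n then (st.1 ++ [PySem.List.pyGetD orig (st.2 : Int) ' '], st.2 + 1) else st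
  else st

def apply_delta_alt (version : String) (delta : List String) : String :=
  let orig := version.toList
  let st := delta.foldl (applyDeltaStepB orig orig.length) ([], 0)
  String.ofList (st.1 ++ PySem.List.slice orig (some (st.2 : Int)) none)

-- ===== PRECONDITION & SPEC =====
def Spec_apply_delta (version : String) (delta : List String) (out : String) : Prop := out = apply_delta_alt version delta
instance (version : String) (delta : List String) (out : String) : Decidable (Spec_apply_delta version delta out) := by unfold Spec_apply_delta; infer_instance

-- ===== CLAIM (what is proved, stated in full; the proofs are below) =====
def Claim_equal_apply_delta : Prop := ∀ (version : String) (delta : List String), Dom_apply_delta version delta → Spec_apply_delta version delta (apply_delta version delta)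

-- ===== LEMMAS AND PROOFS =====

-- Invariant: A's mutable list is B's output followed by the unconsumed suffix of the original;
-- A's index exceeds B's output length only once the cursor has consumed the whole original.
def pvInv (orig : List Char) (a : List Char × Nat) (b : List Char × Nat) : Prop :=
  a.1 = b.1 ++ orig.drop b.2 ∧ b.2 ≤ orig.length ∧ b.1.length ≤ a.2 ∧
  (b.1.length < a.2 → b.2 = orig.length)

lemma pvEraseIdx_append (out rest : List Char) (x : Char) :
    (out ++ x :: rest).eraseIdx out.length = out ++ rest := by
  induction out with
  | nil => simp
  | cons y ys ih => simpa [List.eraseIdx] using ih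

lemma pvInsert_of_ge (xs : List Char) (p : Nat) (v : Char) (h : xs.length ≤ p) :
    PySem.List.insert xs (p : Int) v = xs ++ [v] := by
  simp [PySem.List.insert, PySem.List.sliceIndices]
  have h1 : ¬ ((p : Int) < 0) := by omega
  have h2 : min (p : Int) (xs.length : Int) = (xs.length : Int) := by omega
  rw [if_neg h1, h2]
  simp [List.take_of_length_le (le_refl xs.length), List.drop_of_length_le (le_refl xs.length)]

lemma pvStep_inv (orig : List Char) (a b : List Char × Nat) (change : String)
    (h : pvInv orig a b) :
    pvInv orig (applyDeltaStepA a change) (applyDeltaStepB orig orig.length b change) := by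
  obtain ⟨v, idx⟩ := a
  obtain ⟨out, i⟩ := b
  obtain ⟨hv, hi, hk, hov⟩ := h
  simp only at hv hi hk hov
  unfold applyDeltaStepA applyDeltaStepB
  by_cases hm : PySem.Str.startswith change "-" = true
  · -- delete branch
    rw [if_pos hm, if_pos hm]
    by_cases hlt : i < orig.length
    · -- cursor still inside the original
      have hk0 : out.length = idx := by
        rcases Nat.lt_or_ge out.length idx with hlt' | hge
        · exact absurd (hov hlt') (by omega)
        · omega
      have hdrop : orig.drop i = orig[i] :: orig.drop (i + 1) := List.drop_eq_getElem_cons hlt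
      have hvlen : idx < v.length := by
        rw [hv, hdrop]; simp; omega
      rw [if_pos hvlen, if_pos hlt, PySem.List.pop?_natCast v idx hvlen]
      refine ⟨?_, by omega, by simp [hk0], by simp [hk0]⟩
      simp only
      rw [hv, hdrop, ← hk0, pvEraseIdx_append]
    · -- cursor exhausted: A's guard also fails
      have hie : i = orig.length := by omega
      have hnv : ¬ idx < v.length := by
        rw [hv, hie]; simp; omega
      rw [if_neg hnv, if_neg hlt]
      exact ⟨hv, hi, hk, hov⟩
  · by_cases hp : PySem.Str.startswith change "+" = true
    · -- insert branch
      rw [if_neg hm, if_neg hm, if_pos hp, if_pos hp]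
      by_cases hlen : 2 < PySem.Str.len change
      · rw [if_pos hlen, if_pos hlen]
        cases hc : PySem.Str.pyGet? change 2 with
        | none => exact ⟨hv, hi, hk, hov⟩
        | some c =>
          simp only
          rcases Nat.lt_or_ge out.length idx with hlt' | hge
          · -- overshoot: cursor exhausted, insert appends at the end
            have hie : i = orig.length := hov hlt'
            have hvout : v = out := by rw [hv, hie]; simp
            have hins : PySem.List.insert v (idx : Int) c = v ++ [c] := by
              apply pvInsert_of_ge; rw [hvout]; omega
            refine ⟨?_, hi, by simp; omega, fun _ => hie⟩
            simp only
            rw [hins, hvout, hie]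
            simp
          · -- normal: insert at the boundary between output and suffix
            have hk0 : out.length = idx := by omega
            have hins : PySem.List.insert v (idx : Int) c =
                (out ++ [c]) ++ orig.drop i := by
              rw [← hk0, PySem.List.insert_natCast v out.length c (by rw [hv]; simp)]
              rw [hv]
              simp [List.take_left', List.drop_left']
            refine ⟨hins, hi, by simp; omega, by simp; omega⟩
      · rw [if_neg hlen, if_neg hlen]
        exact ⟨hv, hi, hk, hov⟩
    · by_cases hs : PySem.Str.startswith change " " = true
      · -- keep branch
        rw [if_neg hm, if_neg hm, if_neg hp, if_neg hp, if_pos hs, if_pos hs]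
        by_cases hlt : i < orig.length
        · rw [if_pos hlt]
          have hdrop : orig.drop i = orig[i] :: orig.drop (i + 1) := List.drop_eq_getElem_cons hlt
          have hget : PySem.List.pyGetD orig (i : Int) ' ' = orig[i] := by
            simp [PySem.List.pyGetD_natCast, List.getD_eq_getElem?_getD, hlt]
          refine ⟨?_, by omega, by simp; omega, ?_⟩
          · simp only [hget]
            rw [hv, hdrop]; simp
          · intro hlt'
            simp at hlt'
            exact absurd (hov (by omega)) (by omega)
        · rw [if_neg hlt]
          have hie : i = orig.length := by omega
          exact ⟨hv, hi, Nat.le_succ_of_le hk, fun _ => hie⟩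
      · rw [if_neg hm, if_neg hm, if_neg hp, if_neg hp, if_neg hs, if_neg hs]
        exact ⟨hv, hi, hk, hov⟩

lemma pvFold_inv (delta : List String) (orig : List Char) (a b : List Char × Nat)
    (h : pvInv orig a b) :
    pvInv orig (delta.foldl applyDeltaStepA a)
      (delta.foldl (applyDeltaStepB orig orig.length) b) := by
  induction delta generalizing a b with
  | nil => simpa using h
  | cons c cs ih => exact ih _ _ (pvStep_inv orig a b c h)

-- ===== VERDICT (by name: the statement is the Claim_ definition above) =====
theorem apply_delta_spec : Claim_equal_apply_delta := by
  intro version delta _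
  unfold Spec_apply_delta apply_delta apply_delta_alt
  have h := pvFold_inv delta version.toList (version.toList, 0) ([], 0)
    ⟨by simp, by simp, by simp, by simp⟩
  obtain ⟨hv, hi, -, -⟩ := h
  simp only
  rw [hv, PySem.List.slice_from_natCast]
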